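-- pv_equiv track=rewrite | github.com/MrBrantCode/unitest_baseline | mut_generate/mist_train_cf/cf_5294/solution.py | contains_curse
-- ===== SOURCE A (Python) =====
-- def contains_curse(sentence):
--     curse_words = ['curse1', 'curse2', 'curse3']  # replace with actual curse words
--
--     # Split the sentence into a list of words
--     words = sentence.split()
--
--     # Iterate over each word in the sentence
--     for word in words:
--         # Iterate over each curse word in the curse_words list
--         for curse_word in curse_words:
--             # Compare the word with each curse word
--             if word.lower() == curse_word.lower():
--                 return True
--
--     return False
-- ===== SOURCE B (Python) =====
-- def contains_curse(sentence):
--     curse_words = ['curse1', 'curse2', 'curse3']  # replace with actual curse words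
--     targets = {c.lower() for c in curse_words}
--     # Single pass over the characters: build the current lowercased word,
--     # test it at each word boundary, with early exit. No split() pass.
--     cur = []
--     for ch in sentence:
--         if ch.isspace():
--             if cur and ''.join(cur) in targets:
--                 return True
--             cur = []
--         else:
--             cur.append(ch.lower())
--     return bool(cur) and ''.join(cur) in targets
-- ===== Notes on version B (the rewrite author's own statement) =====
-- stated objective: alternative
-- what changed: Replaces split-then-nested-scan with a single character-level streaming state machine: it accumulates the current lowercased word while scanning the sentence once and tests it against a precomputed lowered curse set at each word boundary, exiting early; not faster in CPython (interpreted per-char loop), traded for a genuinely different one-pass structure.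
import Mathlib
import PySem

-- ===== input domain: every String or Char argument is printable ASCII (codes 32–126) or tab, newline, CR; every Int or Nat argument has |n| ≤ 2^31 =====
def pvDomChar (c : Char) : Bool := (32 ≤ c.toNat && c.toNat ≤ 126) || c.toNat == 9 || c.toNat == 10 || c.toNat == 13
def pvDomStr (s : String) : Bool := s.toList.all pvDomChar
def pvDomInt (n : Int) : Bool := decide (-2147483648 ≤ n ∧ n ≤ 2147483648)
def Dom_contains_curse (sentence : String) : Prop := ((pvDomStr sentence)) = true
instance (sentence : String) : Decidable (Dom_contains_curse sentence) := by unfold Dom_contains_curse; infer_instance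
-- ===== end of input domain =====

-- B replaces A's split-then-nested-scan with a single character-level streaming pass (a state machine accumulating the current lowered word); alternative structure, same return value.


-- ===== PORT A =====
-- nested scan: split the sentence, then compare each word with each curse word
def contains_curse (sentence : String) : Bool :=
  let curse_words : List String := ["curse1", "curse2", "curse3"]
  let words := PySem.Str.split₀ sentence
  words.any (fun word =>
    curse_words.any (fun curse_word =>
      PySem.Str.lower word == PySem.Str.lower curse_word))

-- ===== PORT B =====
-- targets = {c.lower() for c in curse_words}
def curseTargets : PySem.Set String :=
  PySem.Set.ofList ((["curse1", "curse2", "curse3"] : List String).map PySem.Str.lower)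

-- the streaming loop of Source B: `cur` holds the current word's lowered characters;
-- at each whitespace boundary (and at the end) a nonempty `cur` is tested against the set
def curseScan : List Char → List Char → Bool
  | [], cur => !cur.isEmpty && PySem.Set.contains curseTargets (String.ofList cur)
  | ch :: rest, cur =>
    if PySem.Chars.isspace ch then
      if !cur.isEmpty && PySem.Set.contains curseTargets (String.ofList cur) then true
      else curseScan rest []
    else curseScan rest (cur ++ [PySem.Chars.lowerChar ch])

def contains_curse_alt (sentence : String) : Bool :=
  curseScan sentence.toList []

-- ===== PRECONDITION & SPEC =====
def Spec_contains_curse (sentence : String) (out : Bool) : Prop := out = contains_curse_alt sentence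
instance (sentence : String) (out : Bool) : Decidable (Spec_contains_curse sentence out) := by unfold Spec_contains_curse; infer_instance

-- ===== CLAIM (what is proved, stated in full; the proofs are below) =====
def Claim_equal_contains_curse : Prop := ∀ (sentence : String), Dom_contains_curse sentence → Spec_contains_curse sentence (contains_curse sentence)

-- ===== LEMMAS AND PROOFS =====

-- the list of words of `cs`, given that the current (unfinished) word so far is `cur`
def pvWords : List Char → List Char → List (List Char)
  | [], cur => if cur.isEmpty then [] else [cur]
  | c :: rest, cur =>
    if PySem.Chars.isspace c then
      if cur.isEmpty then pvWords rest [] else cur :: pvWords rest []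
    else pvWords rest (cur ++ [c])

theorem go_eq_pvWords : ∀ (cs cur : List Char) (acc : List (List Char)),
    PySem.Chars.split₀.go cs cur acc = acc.reverse ++ pvWords cs cur.reverse := by
  intro cs
  induction cs with
  | nil =>
    intro cur acc
    simp only [PySem.Chars.split₀.go, pvWords]
    by_cases h : cur.isEmpty
    · have h0 : cur = [] := by simpa [List.isEmpty_iff] using h
      simp [h0]
    · have h0 : cur ≠ [] := by simpa [List.isEmpty_eq_false_iff] using (by simpa using h)
      have h' : cur.reverse.isEmpty = false := by
        simp [List.isEmpty_eq_false_iff, h0]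
      simp [h, h']
  | cons c rest ih =>
    intro cur acc
    simp only [PySem.Chars.split₀.go, pvWords]
    by_cases hs : PySem.Chars.isspace c
    · by_cases h : cur.isEmpty
      · have h0 : cur = [] := by simpa [List.isEmpty_iff] using h
        simp [hs, h0, ih]
      · have h0 : cur ≠ [] := by simpa [List.isEmpty_eq_false_iff] using (by simpa using h)
        have h' : cur.reverse.isEmpty = false := by
          simp [List.isEmpty_eq_false_iff, h0]
        simp [hs, h, h', ih]
    · have := ih (c :: cur) acc
      simpa [hs, List.reverse_cons] using this

-- A's inner scan over the three curse words is the membership test B performs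
theorem predA_eq (x : String) :
    (["curse1", "curse2", "curse3"] : List String).any (fun c => x == PySem.Str.lower c)
      = PySem.Set.contains curseTargets x := by
  have h : curseTargets = ["curse1", "curse2", "curse3"] := by decide
  rw [h]
  simp only [PySem.Set.contains, List.contains_eq_any_beq, List.any_cons, List.any_nil]
  simp [eq_comm]
  rfl

-- lowering a string built from chars is building from the lowered chars
theorem ofList_lower (w : List Char) :
    PySem.Str.lower (String.ofList w) = String.ofList (PySem.Chars.lower w) := by
  apply String.toList_injective
  simp [PySem.Str.toList_lower]

-- the streaming scan, run with an already-lowered current word, checks exactly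
-- the words pvWords produces
theorem curseScan_eq_pvWords : ∀ (cs cur : List Char),
    curseScan cs (PySem.Chars.lower cur)
      = (pvWords cs cur).any (fun w => PySem.Set.contains curseTargets (String.ofList (PySem.Chars.lower w))) := by
  intro cs
  induction cs with
  | nil =>
    intro cur
    simp only [curseScan, pvWords]
    by_cases h : cur.isEmpty
    · have h0 : cur = [] := by simpa [List.isEmpty_iff] using h
      simp [h0, PySem.Chars.lower]
    · have h0 : cur ≠ [] := by simpa [List.isEmpty_eq_false_iff] using (by simpa using h)
      have h' : (PySem.Chars.lower cur).isEmpty = false := by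
        simp [PySem.Chars.lower, List.isEmpty_eq_false_iff, h0]
      simp [h, h']
  | cons c rest ih =>
    intro cur
    simp only [curseScan, pvWords]
    by_cases hs : PySem.Chars.isspace c
    · by_cases h : cur.isEmpty
      · have h0 : cur = [] := by simpa [List.isEmpty_iff] using h
        have ih0 : curseScan rest [] =
            (pvWords rest []).any (fun w => PySem.Set.contains curseTargets (String.ofList (PySem.Chars.lower w))) := ih []
        simp [hs, h0, PySem.Chars.lower, ih0]
      · have h0 : cur ≠ [] := by simpa [List.isEmpty_eq_false_iff] using (by simpa using h)
        have h' : (PySem.Chars.lower cur).isEmpty = false := by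
          simp [PySem.Chars.lower, List.isEmpty_eq_false_iff, h0]
        have ih0 : curseScan rest [] =
            (pvWords rest []).any (fun w => PySem.Set.contains curseTargets (String.ofList (PySem.Chars.lower w))) := ih []
        simp only [hs, if_pos, h', Bool.not_false, Bool.true_and, h, if_neg,
          Bool.false_eq_true, not_false_eq_true, List.any_cons]
        rw [ih0]
        cases PySem.Set.contains curseTargets (String.ofList (PySem.Chars.lower cur)) <;> simp
    · have hl : PySem.Chars.lower cur ++ [PySem.Chars.lowerChar c] = PySem.Chars.lower (cur ++ [c]) := by
        simp [PySem.Chars.lower]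
      simp only [hs, Bool.false_eq_true, not_false_eq_true, if_neg, hl, ih]

-- ===== VERDICT (by name: the statement is the Claim_ definition above) =====
theorem contains_curse_spec : Claim_equal_contains_curse := by
  intro sentence _
  unfold Spec_contains_curse contains_curse contains_curse_alt
  have hsplit : PySem.Str.split₀ sentence = (PySem.Chars.split₀ sentence.toList).map String.ofList := rfl
  have hgo : PySem.Chars.split₀ sentence.toList = pvWords sentence.toList [] := by
    have := go_eq_pvWords sentence.toList [] []
    simpa [PySem.Chars.split₀] using this
  have hscan : curseScan sentence.toList [] =
      (pvWords sentence.toList []).any (fun w => PySem.Set.contains curseTargets (String.ofList (PySem.Chars.lower w))) :=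
    curseScan_eq_pvWords sentence.toList []
  have hp : ∀ w : List Char,
      ((["curse1", "curse2", "curse3"] : List String).any (fun c => PySem.Str.lower (String.ofList w) == PySem.Str.lower c))
        = PySem.Set.contains curseTargets (String.ofList (PySem.Chars.lower w)) := by
    intro w
    rw [← ofList_lower]
    exact predA_eq (PySem.Str.lower (String.ofList w))
  rw [hsplit, List.any_map, hscan, hgo]
  refine List.any_congr rfl (fun w => ?_)
  simpa [Function.comp] using hp w
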